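-- pv_equiv track=rewrite | github.com/neptyneco/neptyne-kernel | neptyne_kernel/formulas/helpers.py | re_from_wildcard
-- ===== SOURCE A (Python) =====
-- def re_from_wildcard(wildcard: str) -> str:
--     re_pattern = []
--     i = 0
--     while i < len(wildcard):
--         if wildcard[i] == "~":
--             if i < len(wildcard) - 1:
--                 if wildcard[i + 1] == "?":
--                     re_pattern += ["\\", "?"]
--                     i += 1
--                 elif wildcard[i + 1] == "*":
--                     re_pattern += ["\\", "*"]
--                     i += 1
--                 else:
--                     re_pattern.append("~")
--             else:
--                 re_pattern.append("~")
--         elif wildcard[i] == "*":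
--             re_pattern += [".", "*"]
--         elif wildcard[i] == "?":
--             re_pattern.append(".")
--         elif wildcard[i] in ".^$+{}\\[]|()":
--             re_pattern += ["\\", wildcard[i]]
--         else:
--             re_pattern.append(wildcard[i])
--         i += 1
--     return "".join(re_pattern)
-- ===== SOURCE B (Python) =====
-- import re
--
-- def re_from_wildcard(wildcard: str) -> str:
--     def repl(m):
--         t = m.group(0)
--         if t == "~?":
--             return "\\?"
--         if t == "~*":
--             return "\\*"
--         if t == "*":
--             return ".*"
--         if t == "?":
--             return "."
--         if t in ".^$+{}\\[]|()":
--             return "\\" + t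
--         return t
--     return re.sub(r"~\?|~\*|.", repl, wildcard, flags=re.DOTALL)
-- ===== Notes on version B (the rewrite author's own statement) =====
-- stated objective: idiomatic
-- what changed: Replaces the hand-written index loop with manual one-character lookahead by a single re.sub over the alternation ~\?|~\*|. (DOTALL) whose replacement callback maps each matched token, letting the regex engine do the scanning.
import Mathlib
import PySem

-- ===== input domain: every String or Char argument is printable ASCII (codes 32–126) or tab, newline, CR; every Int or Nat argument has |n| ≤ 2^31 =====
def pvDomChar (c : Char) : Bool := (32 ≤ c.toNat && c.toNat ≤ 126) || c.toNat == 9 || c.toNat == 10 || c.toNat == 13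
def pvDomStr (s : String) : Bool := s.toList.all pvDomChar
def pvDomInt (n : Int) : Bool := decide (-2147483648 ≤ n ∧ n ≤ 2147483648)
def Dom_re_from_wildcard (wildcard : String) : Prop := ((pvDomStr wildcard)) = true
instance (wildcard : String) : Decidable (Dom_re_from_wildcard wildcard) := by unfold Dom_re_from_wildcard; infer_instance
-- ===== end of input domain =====

-- B replaces A's hand-written index loop and lookahead with a regex-driven token scan
-- (re.sub with a replacement callback); same output, idiomatic rather than faster.

-- ===== PORT A =====
-- A's while-loop over index i, with its manual lookahead at wildcard[i+1]; the cons cell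
-- stands for "i < len" and the head of the tail for wildcard[i + 1].
def reFromWildcardLoopA : List Char → List Char
  | [] => []
  | c :: rest =>
    if c = '~' then
      match rest with
      | d :: rest' =>
        if d = '?' then '\\' :: '?' :: reFromWildcardLoopA rest'
        else if d = '*' then '\\' :: '*' :: reFromWildcardLoopA rest'
        else '~' :: reFromWildcardLoopA (d :: rest')
      | [] => ['~']
    else if c = '*' then '.' :: '*' :: reFromWildcardLoopA rest
    else if c = '?' then '.' :: reFromWildcardLoopA rest
    else if (".^$+{}\\[]|()".toList.contains c) then '\\' :: c :: reFromWildcardLoopA rest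
    else c :: reFromWildcardLoopA rest
termination_by cs => cs.length
decreasing_by all_goals (simp_all; try omega)

def re_from_wildcard (wildcard : String) : String :=
  String.ofList (reFromWildcardLoopA wildcard.toList)

-- ===== PORT B =====
-- B's replacement callback: what repl(m) returns for a single-character token.
def reFromWildcardRepl (c : Char) : List Char :=
  if c = '*' then ['.', '*']
  else if c = '?' then ['.']
  else if (".^$+{}\\[]|()".toList.contains c) then ['\\', c]
  else [c]

-- B's regex r"~\?|~\*|." tokenization: the alternation matches "~?" or "~*" as one
-- token, otherwise a single character (DOTALL: any character), each replaced by repl.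
def reFromWildcardScanB : List Char → List Char
  | '~' :: '?' :: rest => '\\' :: '?' :: reFromWildcardScanB rest
  | '~' :: '*' :: rest => '\\' :: '*' :: reFromWildcardScanB rest
  | c :: rest => reFromWildcardRepl c ++ reFromWildcardScanB rest
  | [] => []

def re_from_wildcard_alt (wildcard : String) : String :=
  String.ofList (reFromWildcardScanB wildcard.toList)

-- ===== PRECONDITION & SPEC =====
def Spec_re_from_wildcard (wildcard : String) (out : String) : Prop := out = re_from_wildcard_alt wildcard
instance (wildcard : String) (out : String) : Decidable (Spec_re_from_wildcard wildcard out) := by unfold Spec_re_from_wildcard; infer_instance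

-- ===== CLAIM (what is proved, stated in full; the proofs are below) =====
def Claim_equal_re_from_wildcard : Prop := ∀ (wildcard : String), Dom_re_from_wildcard wildcard → Spec_re_from_wildcard wildcard (re_from_wildcard wildcard)

-- ===== LEMMAS AND PROOFS =====
-- A's non-'~' step: one character is consumed and emitted exactly as B's repl maps it.
theorem reFromWildcardLoopA_step (c : Char) (rest : List Char) (hc : c ≠ '~') :
    reFromWildcardLoopA (c :: rest) = reFromWildcardRepl c ++ reFromWildcardLoopA rest := by
  rw [reFromWildcardLoopA.eq_def]
  simp only [reFromWildcardRepl]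
  split_ifs <;> simp_all

theorem reFromWildcard_loop_eq_scan : ∀ cs : List Char,
    reFromWildcardLoopA cs = reFromWildcardScanB cs
  | [] => by rw [reFromWildcardLoopA.eq_def]; rfl
  | [c] => by
    by_cases hc : c = '~'
    · subst hc; rw [reFromWildcardLoopA.eq_def]; rfl
    · have hB : reFromWildcardScanB [c] = reFromWildcardRepl c ++ reFromWildcardScanB [] := by
        rw [reFromWildcardScanB.eq_def]; simp
      rw [reFromWildcardLoopA_step c [] hc, hB, reFromWildcard_loop_eq_scan []]
  | c :: d :: rest => by
    by_cases hc : c = '~'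
    · subst hc
      rw [reFromWildcardLoopA.eq_def]
      by_cases hd : d = '?'
      · subst hd
        simp [reFromWildcardScanB, reFromWildcard_loop_eq_scan rest]
      · by_cases hd2 : d = '*'
        · subst hd2
          simp [reFromWildcardScanB, hd, reFromWildcard_loop_eq_scan rest]
        · have hB : reFromWildcardScanB ('~' :: d :: rest)
              = reFromWildcardRepl '~' ++ reFromWildcardScanB (d :: rest) := by
            rw [reFromWildcardScanB.eq_def]
            simp [hd, hd2]
          rw [hB]
          simp [reFromWildcardRepl, hd, hd2, reFromWildcard_loop_eq_scan (d :: rest)]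
    · have hB : reFromWildcardScanB (c :: d :: rest)
          = reFromWildcardRepl c ++ reFromWildcardScanB (d :: rest) := by
        rw [reFromWildcardScanB.eq_def]
        simp [hc]
      rw [reFromWildcardLoopA_step c (d :: rest) hc, hB,
        reFromWildcard_loop_eq_scan (d :: rest)]
termination_by cs => cs.length
decreasing_by all_goals (simp_all; try omega)

-- ===== VERDICT (by name: the statement is the Claim_ definition above) =====
theorem re_from_wildcard_spec : Claim_equal_re_from_wildcard := by
  intro wildcard _
  unfold Spec_re_from_wildcard re_from_wildcard re_from_wildcard_alt
  rw [reFromWildcard_loop_eq_scan]
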